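-- pv_equiv track=rewrite | github.com/lotanamit5/grum4llm | src/grums/core/validations.py | satisfies_connectivity_condition
-- ===== SOURCE A (Python) =====
-- from itertools import combinations
--
-- def satisfies_connectivity_condition(
--     rankings: list[tuple[int, ...]],
--     n_alternatives: int,
-- ) -> bool:
--     """Check Condition 1 from the paper.
--
--     For every partition C1, C2 of alternatives, at least one pair c1 in C1, c2 in C2
--     must appear in some ranking with c1 preferred to c2.
--     """
--
--     all_alts = set(range(n_alternatives))
--     if n_alternatives < 2:
--         return False
--
--     for r in range(1, n_alternatives):
--         for subset in combinations(range(n_alternatives), r):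
--             c1 = set(subset)
--             c2 = all_alts - c1
--             if not c2:
--                 continue
--
--             has_cross_edge = False
--             for ranking in rankings:
--                 rank_pos = {alt: idx for idx, alt in enumerate(ranking)}
--                 for left in c1:
--                     for right in c2:
--                         left_pos = rank_pos.get(left)
--                         right_pos = rank_pos.get(right)
--                         if left_pos is not None and right_pos is not None and left_pos < right_pos:
--                             has_cross_edge = True
--                             break
--                     if has_cross_edge:
--                         break
--                 if has_cross_edge:
--                     break
--
--             if not has_cross_edge:
--                 return False
--
--     return True
-- ===== SOURCE B (Python) =====
-- def satisfies_connectivity_condition(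
--     rankings: list[tuple[int, ...]],
--     n_alternatives: int,
-- ) -> bool:
--     """Check Condition 1 (every cut has a cross edge) via strong connectivity:
--     build the preference digraph once, then test that alternative 0 reaches
--     every alternative and every alternative reaches 0."""
--     if n_alternatives < 2:
--         return False
--     n = n_alternatives
--     edges = []
--     for ranking in rankings:
--         pos = {alt: idx for idx, alt in enumerate(ranking)}
--         for u in pos:
--             for v in pos:
--                 if 0 <= u < n and 0 <= v < n and pos[u] < pos[v]:
--                     edges.append((u, v))
--
--     def reach_all(es):
--         seen = {0}
--         for _ in range(n):
--             prev = len(seen)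
--             for (u, v) in es:
--                 if u in seen:
--                     seen.add(v)
--             if len(seen) == prev:
--                 break
--         return all(v in seen for v in range(n))
--
--     return reach_all(edges) and reach_all([(v, u) for (u, v) in edges])
-- ===== Notes on version B (the rewrite author's own statement) =====
-- stated objective: faster
-- what changed: Instead of enumerating all 2^n partitions and rescanning the rankings for each, B builds the pairwise preference digraph once and checks strong connectivity (node 0 reaches all and all reach 0) by iterated relaxation, which is equivalent to every cut having a cross edge.
import Mathlib
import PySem

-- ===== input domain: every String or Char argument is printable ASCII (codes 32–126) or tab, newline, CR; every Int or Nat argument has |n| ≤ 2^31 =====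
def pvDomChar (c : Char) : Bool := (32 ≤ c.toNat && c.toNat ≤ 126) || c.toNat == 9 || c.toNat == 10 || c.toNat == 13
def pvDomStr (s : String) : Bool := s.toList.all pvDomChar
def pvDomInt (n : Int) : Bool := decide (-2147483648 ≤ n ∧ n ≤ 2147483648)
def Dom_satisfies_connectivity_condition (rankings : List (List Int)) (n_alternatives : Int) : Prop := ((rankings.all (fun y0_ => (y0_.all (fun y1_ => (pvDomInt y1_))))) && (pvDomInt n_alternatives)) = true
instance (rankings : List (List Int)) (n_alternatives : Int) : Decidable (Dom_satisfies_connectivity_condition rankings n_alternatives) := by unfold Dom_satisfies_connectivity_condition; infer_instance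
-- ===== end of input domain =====

-- B replaces A's enumeration of all 2^n partitions by building the preference digraph once and
-- testing strong connectivity by iterated relaxation (objective: faster).

-- ===== PORT A =====
-- rank_pos = {alt: idx for idx, alt in enumerate(ranking)}
def rankPosA (ranking : List Int) : PySem.Dict Int Int :=
  (PySem.List.enumerate ranking).foldl (fun d p => d.insert p.2 p.1) PySem.Dict.empty

-- the triple break-out flag loop over rankings × c1 × c2 (pure existence, so `any`)
def hasCrossA (rankings : List (List Int)) (c1 c2 : List Int) : Bool :=
  rankings.any fun ranking =>
    let pos := rankPosA ranking
    c1.any fun left => c2.any fun right =>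
      match pos.get? left, pos.get? right with
      | some lp, some rp => decide (lp < rp)
      | _, _ => false

-- itertools.combinations(xs, r) (lexicographic order)
def combosA : Nat → List Int → List (List Int)
  | 0, _ => [[]]
  | _ + 1, [] => []
  | r + 1, x :: xs => (combosA r xs).map (x :: ·) ++ combosA (r + 1) xs

-- c1 = set(subset) and c2 = all_alts - c1 are only consumed by existence tests, so lists stand in
-- for the sets (the result does not depend on Python's set iteration order).
def satisfies_connectivity_condition (rankings : List (List Int)) (n_alternatives : Int) : Bool :=
  if n_alternatives < 2 then false
  else
    (PySem.List.pyRange 1 n_alternatives 1).all fun r =>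
      (combosA r.toNat (PySem.List.pyRange 0 n_alternatives 1)).all fun c1 =>
        let c2 := (PySem.List.pyRange 0 n_alternatives 1).filter (fun x => !c1.contains x)
        if c2 = [] then true else hasCrossA rankings c1 c2

-- ===== PORT B =====
def rankPosB (ranking : List Int) : PySem.Dict Int Int :=
  (PySem.List.enumerate ranking).foldl (fun d p => d.insert p.2 p.1) PySem.Dict.empty

-- edges: for each ranking, all ranked pairs (u, v) inside range(n) with pos[u] < pos[v]
def edgesOf (rankings : List (List Int)) (n : Int) : List (Int × Int) :=
  rankings.foldl
    (fun es ranking =>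
      let pos := rankPosB ranking
      es ++ pos.keys.flatMap fun u =>
        pos.keys.filterMap fun v =>
          if (decide (0 ≤ u) && decide (u < n)) && (decide (0 ≤ v) && decide (v < n)) then
            match pos.get? u, pos.get? v with
            | some pu, some pv => if pu < pv then some (u, v) else none
            | _, _ => none
          else none)
    []

-- one pass of `for (u, v) in es: if u in seen: seen.add(v)` (seen is a Python set)
def relaxStep (es : List (Int × Int)) (seen : PySem.Set Int) : PySem.Set Int :=
  es.foldl (fun s e => if s.contains e.1 then PySem.Set.add s e.2 else s) seen

-- at most n relaxation rounds, breaking as soon as a round adds nothing (len(seen) == prev)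
def reachLoop (es : List (Int × Int)) : Nat → PySem.Set Int → PySem.Set Int
  | 0, s => s
  | k + 1, s =>
    let s' := relaxStep es s
    if s' = s then s else reachLoop es k s'

-- reach_all: relaxation rounds from {0}, then check all of range(n) was seen
def reachAll (n : Int) (es : List (Int × Int)) : Bool :=
  let seen := reachLoop es n.toNat [0]
  (PySem.List.pyRange 0 n 1).all fun v => seen.contains v

def satisfies_connectivity_condition_alt (rankings : List (List Int)) (n_alternatives : Int) : Bool :=
  if n_alternatives < 2 then false
  else
    let edges := edgesOf rankings n_alternatives
    reachAll n_alternatives edges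
      && reachAll n_alternatives (edges.map fun e => (e.2, e.1))

-- ===== PRECONDITION & SPEC =====
def Spec_satisfies_connectivity_condition (rankings : List (List Int)) (n_alternatives : Int) (out : Bool) : Prop := out = satisfies_connectivity_condition_alt rankings n_alternatives
instance (rankings : List (List Int)) (n_alternatives : Int) (out : Bool) : Decidable (Spec_satisfies_connectivity_condition rankings n_alternatives out) := by unfold Spec_satisfies_connectivity_condition; infer_instance

-- ===== CLAIM (what is proved, stated in full; the proofs are below) =====
def Claim_equal_satisfies_connectivity_condition : Prop := ∀ (rankings : List (List Int)) (n_alternatives : Int), Dom_satisfies_connectivity_condition rankings n_alternatives → Spec_satisfies_connectivity_condition rankings n_alternatives (satisfies_connectivity_condition rankings n_alternatives)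

-- ===== LEMMAS AND PROOFS =====

-- abstract edge relation: u is preferred to v in some ranking
def hasEdge (rks : List (List Int)) (u v : Int) : Bool :=
  rks.any fun ranking =>
    match (rankPosA ranking).get? u, (rankPosA ranking).get? v with
    | some pu, some pv => decide (pu < pv)
    | _, _ => false

-- A's condition, abstractly: every nonempty proper subset of range(n) has an outgoing edge
def GoodCuts (rks : List (List Int)) (n : Int) : Prop :=
  ∀ c1 : List Int, c1.Sublist (PySem.List.pyRange 0 n 1) → c1 ≠ [] → c1.length < n.toNat →
    ∃ u ∈ c1, ∃ v ∈ PySem.List.pyRange 0 n 1, v ∉ c1 ∧ hasEdge rks u v = true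

theorem mem_combosA (k : Nat) (xs : List Int) (c : List Int) :
    c ∈ combosA k xs ↔ c.Sublist xs ∧ c.length = k := by
  induction xs generalizing k c with
  | nil =>
    cases k with
    | zero =>
      simp only [combosA, List.mem_singleton, List.sublist_nil]
      constructor
      · rintro rfl; exact ⟨rfl, rfl⟩
      · rintro ⟨rfl, _⟩; rfl
    | succ k =>
      simp only [combosA, List.not_mem_nil, false_iff, not_and, List.sublist_nil]
      rintro rfl; simp
  | cons x xs ih =>
    cases k with
    | zero =>
      simp only [combosA, List.mem_singleton]
      constructor
      · rintro rfl; exact ⟨List.nil_sublist _, rfl⟩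
      · rintro ⟨_, hl⟩; exact List.length_eq_zero_iff.mp hl
    | succ k =>
      simp only [combosA, List.mem_append, List.mem_map, ih]
      constructor
      · rintro (⟨t, ⟨hts, htl⟩, rfl⟩ | ⟨hs, hl⟩)
        · exact ⟨List.cons_sublist_cons.mpr hts, by simp [htl]⟩
        · exact ⟨hs.trans (List.sublist_cons_self _ _), hl⟩
      · rintro ⟨hs, hl⟩
        rcases List.sublist_cons_iff.mp hs with h | ⟨r, rfl, hr⟩
        · exact Or.inr ⟨h, hl⟩
        · exact Or.inl ⟨r, ⟨hr, by simpa using hl⟩, rfl⟩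

theorem exists_notMem_of_length_lt {n : Int} {c1 : List Int}
    (hl : c1.length < n.toNat) :
    ∃ v ∈ PySem.List.pyRange 0 n 1, v ∉ c1 := by
  by_contra h
  push Not at h
  have hsub : PySem.List.pyRange 0 n 1 ⊆ c1 := fun v hv => h v hv
  have hle := List.Subperm.length_le
    (List.subperm_of_subset (PySem.List.nodup_pyRange_one 0 n) hsub)
  rw [PySem.List.length_pyRange_one] at hle
  omega

theorem hasCrossA_iff (rks : List (List Int)) (c1 c2 : List Int) :
    hasCrossA rks c1 c2 = true ↔ ∃ u ∈ c1, ∃ v ∈ c2, hasEdge rks u v = true := by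
  simp only [hasCrossA, hasEdge, List.any_eq_true]
  tauto

theorem mem_edgesOf (rks : List (List Int)) (n : Int) (p : Int × Int) :
    p ∈ edgesOf rks n ↔
      p.1 ∈ PySem.List.pyRange 0 n 1 ∧ p.2 ∈ PySem.List.pyRange 0 n 1 ∧ hasEdge rks p.1 p.2 = true := by
  have hfold : edgesOf rks n = rks.flatMap (fun ranking =>
      (rankPosB ranking).keys.flatMap fun u =>
        (rankPosB ranking).keys.filterMap fun v =>
          if (decide (0 ≤ u) && decide (u < n)) && (decide (0 ≤ v) && decide (v < n)) then
            match (rankPosB ranking).get? u, (rankPosB ranking).get? v with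
            | some pu, some pv => if pu < pv then some (u, v) else none
            | _, _ => none
          else none) := by
    rw [edgesOf]
    rw [PySem.List.foldl_append_eq_flatMap]
    simp
  rw [hfold]
  simp only [List.mem_flatMap, List.mem_filterMap, hasEdge, List.any_eq_true,
    PySem.List.mem_pyRange_one]
  constructor
  · rintro ⟨ranking, hrk, u, hu, v, hv, hsome⟩
    by_cases hb : ((decide (0 ≤ u) && decide (u < n)) && (decide (0 ≤ v) && decide (v < n))) = true
    · rw [if_pos hb] at hsome
      rcases h1 : (rankPosB ranking).get? u with _ | pu <;>
        rcases h2 : (rankPosB ranking).get? v with _ | pv <;>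
        simp [h1, h2] at hsome
      rcases hsome with ⟨hlt, rfl, rfl⟩
      simp only [Bool.and_eq_true, decide_eq_true_eq] at hb
      refine ⟨⟨hb.1.1, hb.1.2⟩, ⟨hb.2.1, hb.2.2⟩, ranking, hrk, ?_⟩
      have h1' : (rankPosA ranking).get? u = some pu := h1
      have h2' : (rankPosA ranking).get? v = some pv := h2
      simp [h1', h2', hlt]
    · rw [if_neg hb] at hsome
      exact absurd hsome (by simp)
  · rintro ⟨h1, h2, ranking, hrk, hm⟩
    refine ⟨ranking, hrk, p.1, ?_, p.2, ?_, ?_⟩ <;>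
      rcases hg1 : (rankPosA ranking).get? p.1 with _ | pu <;>
        rcases hg2 : (rankPosA ranking).get? p.2 with _ | pv <;>
        simp [hg1, hg2] at hm
    · have : (rankPosB ranking).contains p.1 = true := by
        rw [PySem.Dict.contains_eq_isSome_get?, (by exact hg1 : (rankPosB ranking).get? p.1 = some pu)]
        rfl
      exact (PySem.Dict.contains_iff_mem_keys _ _).mp this
    · have : (rankPosB ranking).contains p.2 = true := by
        rw [PySem.Dict.contains_eq_isSome_get?, (by exact hg2 : (rankPosB ranking).get? p.2 = some pv)]
        rfl
      exact (PySem.Dict.contains_iff_mem_keys _ _).mp this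
    · have hg1' : (rankPosB ranking).get? p.1 = some pu := hg1
      have hg2' : (rankPosB ranking).get? p.2 = some pv := hg2
      rw [if_pos (by simp only [Bool.and_eq_true, decide_eq_true_eq]; exact ⟨⟨h1.1, h1.2⟩, h2.1, h2.2⟩)]
      simp [hg1', hg2', hm]

theorem relaxStep_append (es : List (Int × Int)) (s : List Int) :
    ∃ t, relaxStep es s = s ++ t := by
  induction es generalizing s with
  | nil => exact ⟨[], by simp [relaxStep]⟩
  | cons e es ih =>
    have hstep : relaxStep (e :: es) s
        = relaxStep es (if s.contains e.1 then PySem.Set.add s e.2 else s) := rfl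
    by_cases hc : s.contains e.1 = true
    · rw [hstep, if_pos hc, PySem.Set.add_eq_ite]
      by_cases hm : e.2 ∈ s
      · rw [if_pos hm]; exact ih s
      · rw [if_neg hm]
        obtain ⟨t, ht⟩ := ih (s ++ [e.2])
        exact ⟨[e.2] ++ t, by rw [ht, List.append_assoc]⟩
    · rw [hstep, if_neg hc]; exact ih s

theorem mem_relaxStep_of_mem {es : List (Int × Int)} {s : List Int} {x : Int} (hx : x ∈ s) :
    x ∈ relaxStep es s := by
  obtain ⟨t, ht⟩ := relaxStep_append es s
  rw [ht]; exact List.mem_append_left _ hx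

theorem relaxStep_closed_pred (Q : Int → Prop) (es0 : List (Int × Int))
    (hQ : ∀ e ∈ es0, Q e.1 → Q e.2) :
    ∀ (es : List (Int × Int)), (∀ e ∈ es, e ∈ es0) →
      ∀ (s : List Int), (∀ x ∈ s, Q x) → ∀ x ∈ relaxStep es s, Q x := by
  intro es
  induction es with
  | nil => intro _ s hs x hx; exact hs x hx
  | cons e es ih =>
    intro hsub s hs
    have hstep : relaxStep (e :: es) s
        = relaxStep es (if s.contains e.1 then PySem.Set.add s e.2 else s) := rfl
    rw [hstep]
    apply ih (fun f hf => hsub f (List.mem_cons_of_mem _ hf))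
    by_cases hc : s.contains e.1 = true
    · rw [if_pos hc]
      intro x hx
      rw [PySem.Set.mem_add] at hx
      rcases hx with h | h
      · exact hs x h
      · subst h
        exact hQ e (hsub e List.mem_cons_self) (hs e.1 (by simpa using hc))
    · rw [if_neg hc]; exact hs

theorem relaxStep_stable_closed {es : List (Int × Int)} {s : List Int}
    (h : relaxStep es s = s) : ∀ e ∈ es, e.1 ∈ s → e.2 ∈ s := by
  induction es with
  | nil => simp
  | cons e es ih =>
    have hstep : relaxStep (e :: es) s
        = relaxStep es (if s.contains e.1 then PySem.Set.add s e.2 else s) := rfl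
    rw [hstep] at h
    by_cases hc : s.contains e.1 = true
    · rw [if_pos hc] at h
      have hmem : e.2 ∈ s := by
        have h2 : e.2 ∈ relaxStep es (PySem.Set.add s e.2) :=
          mem_relaxStep_of_mem (by rw [PySem.Set.mem_add]; exact Or.inr rfl)
        rw [h] at h2; exact h2
      have hadd : PySem.Set.add s e.2 = s := PySem.Set.add_of_mem hmem
      rw [hadd] at h
      intro f hf
      rcases List.mem_cons.mp hf with rfl | hf'
      · intro _; exact hmem
      · exact ih h f hf'
    · rw [if_neg hc] at h
      intro f hf
      rcases List.mem_cons.mp hf with rfl | hf'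
      · intro h1; exact absurd (by simpa using h1 : f.1 ∈ s) (by simpa using hc)
      · exact ih h f hf'

theorem relaxStep_nodup (es : List (Int × Int)) (s : List Int) (h : s.Nodup) :
    (relaxStep es s).Nodup := by
  induction es generalizing s with
  | nil => exact h
  | cons e es ih =>
    have hstep : relaxStep (e :: es) s
        = relaxStep es (if s.contains e.1 then PySem.Set.add s e.2 else s) := rfl
    rw [hstep]
    by_cases hc : s.contains e.1 = true
    · rw [if_pos hc]; exact ih _ (PySem.Set.nodup_add s e.2 h)
    · rw [if_neg hc]; exact ih _ h

theorem relaxStep_stable_of_bounded (es : List (Int × Int)) (L : List Int)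
    (h0 : (0 : Int) ∈ L) (hE : ∀ e ∈ es, e.2 ∈ L) :
    relaxStep es ((relaxStep es)^[L.length] [0]) = (relaxStep es)^[L.length] [0] := by
  have hmem : ∀ k : Nat, ∀ x ∈ (relaxStep es)^[k] ([0] : List Int), x ∈ L := by
    intro k
    induction k with
    | zero => intro x hx; simp at hx; subst hx; exact h0
    | succ k ih =>
      rw [Function.iterate_succ_apply']
      exact relaxStep_closed_pred (· ∈ L) es (fun e he _ => hE e he) es (fun e he => he) _ ih
  have hnodup : ∀ k : Nat, ((relaxStep es)^[k] ([0] : List Int)).Nodup := by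
    intro k
    induction k with
    | zero => simp
    | succ k ih => rw [Function.iterate_succ_apply']; exact relaxStep_nodup es _ ih
  have hlen : ∀ k : Nat, ((relaxStep es)^[k] ([0] : List Int)).length ≤ L.length := by
    intro k
    exact List.Subperm.length_le (List.subperm_of_subset (hnodup k) (hmem k))
  by_cases hex : ∃ j, j < L.length ∧
      relaxStep es ((relaxStep es)^[j] [0]) = (relaxStep es)^[j] ([0] : List Int)
  · obtain ⟨j, hj, hfix⟩ := hex
    have heq : (relaxStep es)^[L.length] ([0] : List Int) = (relaxStep es)^[j] [0] := by
      rw [show L.length = (L.length - j) + j by omega, Function.iterate_add_apply]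
      exact Function.iterate_fixed hfix (L.length - j)
    rw [heq]; exact hfix
  · push Not at hex
    have key : ∀ k : Nat, k ≤ L.length → k + 1 ≤ ((relaxStep es)^[k] ([0] : List Int)).length := by
      intro k
      induction k with
      | zero => intro _; simp
      | succ k ih =>
        intro hk
        have h1 := ih (by omega)
        obtain ⟨t, ht⟩ := relaxStep_append es ((relaxStep es)^[k] ([0] : List Int))
        have hne := hex k (by omega)
        rw [Function.iterate_succ_apply', ht]
        rcases t with _ | ⟨y, t⟩
        · exact absurd (by simpa using ht) hne
        · simp only [List.length_append, List.length_cons]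
          omega
    have := key L.length le_rfl
    have := hlen L.length
    omega

theorem mem_iterS_zero (es : List (Int × Int)) (k : Nat) :
    (0 : Int) ∈ (relaxStep es)^[k] [0] := by
  induction k with
  | zero => simp
  | succ k ih => rw [Function.iterate_succ_apply']; exact mem_relaxStep_of_mem ih

theorem iterS_sound (es : List (Int × Int)) (k : Nat) :
    ∀ x ∈ (relaxStep es)^[k] ([0] : List Int),
      Relation.ReflTransGen (fun a b => (a, b) ∈ es) 0 x := by
  induction k with
  | zero => intro x hx; simp at hx; subst hx; exact Relation.ReflTransGen.refl
  | succ k ih =>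
    rw [Function.iterate_succ_apply']
    exact relaxStep_closed_pred _ es
      (fun e he h => Relation.ReflTransGen.tail h (by simpa using he)) es (fun e he => he) _ ih

theorem crossing {Rel : Int → Int → Prop} {S : List Int} {a b : Int}
    (h : Relation.ReflTransGen Rel a b) (ha : a ∈ S) (hb : b ∉ S) :
    ∃ x ∈ S, ∃ y, y ∉ S ∧ Rel x y := by
  revert ha
  induction h using Relation.ReflTransGen.head_induction_on with
  | refl => intro ha; exact absurd ha hb
  | head hrel _ ih =>
    intro ha
    rename_i a' c _
    by_cases hc : c ∈ S
    · exact ih hc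
    · exact ⟨a', ha, c, hc, hrel⟩


theorem satA_iff (rks : List (List Int)) (n : Int) (hn : 2 ≤ n) :
    satisfies_connectivity_condition rks n = true ↔ GoodCuts rks n := by
  unfold satisfies_connectivity_condition
  rw [if_neg (by omega : ¬ n < 2)]
  simp only [List.all_eq_true]
  constructor
  · intro h c1 hsub hne hlen
    have hpos : 0 < c1.length := List.length_pos_iff.mpr hne
    have hr : (c1.length : Int) ∈ PySem.List.pyRange 1 n 1 := by
      rw [PySem.List.mem_pyRange_one]; omega
    have hc : c1 ∈ combosA (c1.length : Int).toNat (PySem.List.pyRange 0 n 1) :=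
      (mem_combosA _ _ _).mpr ⟨hsub, by simp⟩
    have hall := h _ hr _ hc
    obtain ⟨v, hvr, hvc⟩ := exists_notMem_of_length_lt hlen
    have hvc2 : v ∈ (PySem.List.pyRange 0 n 1).filter (fun x => !c1.contains x) :=
      List.mem_filter.mpr ⟨hvr, by simpa using hvc⟩
    rw [if_neg (List.ne_nil_of_mem hvc2)] at hall
    obtain ⟨u, hu, w, hw, he⟩ := (hasCrossA_iff _ _ _).mp hall
    have hw' := List.mem_filter.mp hw
    exact ⟨u, hu, w, hw'.1, by simpa using hw'.2, he⟩
  · intro h r hr c1 hc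
    rw [mem_combosA] at hc
    obtain ⟨hsub, hlen⟩ := hc
    rw [PySem.List.mem_pyRange_one] at hr
    by_cases hc2 : (PySem.List.pyRange 0 n 1).filter (fun x => !c1.contains x) = []
    · rw [if_pos hc2]
    · rw [if_neg hc2]
      have hne : c1 ≠ [] := by
        intro h0; subst h0; simp at hlen; omega
      have hlen' : c1.length < n.toNat := by omega
      obtain ⟨u, hu, v, hvr, hvn, he⟩ := h c1 hsub hne hlen'
      exact (hasCrossA_iff _ _ _).mpr
        ⟨u, hu, v, List.mem_filter.mpr ⟨hvr, by simpa using hvn⟩, he⟩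

theorem reachLoop_eq_iterate (es : List (Int × Int)) (k : Nat) (s : PySem.Set Int) :
    reachLoop es k s = (relaxStep es)^[k] s := by
  induction k generalizing s with
  | zero => rfl
  | succ k ih =>
    rw [reachLoop, Function.iterate_succ_apply]
    by_cases hfix : relaxStep es s = s
    · rw [if_pos hfix, hfix, Function.iterate_fixed hfix]
    · rw [if_neg hfix, ih]

theorem reachAll_iff (n : Int) (es : List (Int × Int)) :
    reachAll n es = true ↔
      ∀ v ∈ PySem.List.pyRange 0 n 1, v ∈ (relaxStep es)^[n.toNat] ([0] : List Int) := by
  unfold reachAll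
  rw [reachLoop_eq_iterate]
  simp [List.all_eq_true]

theorem mem_map_swap (es : List (Int × Int)) (a b : Int) :
    (a, b) ∈ es.map (fun e => (e.2, e.1)) ↔ (b, a) ∈ es := by
  constructor
  · rintro h
    rcases List.mem_map.mp h with ⟨⟨p, q⟩, hm, heq⟩
    simp only [Prod.mk.injEq] at heq
    obtain ⟨rfl, rfl⟩ := heq
    exact hm
  · intro h
    exact List.mem_map.mpr ⟨(b, a), h, rfl⟩

theorem main_iff (rks : List (List Int)) (n : Int) (hn : 2 ≤ n) :
    GoodCuts rks n ↔
      (reachAll n (edgesOf rks n) && reachAll n ((edgesOf rks n).map fun e => (e.2, e.1))) = true := by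
  have hLlen : (PySem.List.pyRange 0 n 1).length = n.toNat := by
    rw [PySem.List.length_pyRange_one]; omega
  have h0r : (0 : Int) ∈ PySem.List.pyRange 0 n 1 := by
    rw [PySem.List.mem_pyRange_one]; omega
  rw [Bool.and_eq_true, reachAll_iff, reachAll_iff]
  constructor
  · intro hgc
    constructor
    · -- forward reachability is full
      intro v hv
      by_contra hvS
      have hstab := relaxStep_stable_of_bounded (edgesOf rks n) (PySem.List.pyRange 0 n 1)
        h0r (fun e he => ((mem_edgesOf rks n e).mp he).2.1)
      rw [hLlen] at hstab
      set S := (relaxStep (edgesOf rks n))^[n.toNat] ([0] : List Int) with hS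
      have h0S : (0 : Int) ∈ S := mem_iterS_zero _ _
      set l := (PySem.List.pyRange 0 n 1).filter (fun x => S.contains x) with hl
      have hmem_l : ∀ x, x ∈ l ↔ x ∈ PySem.List.pyRange 0 n 1 ∧ x ∈ S := by
        intro x; rw [hl, List.mem_filter]; simp
      have hlsub : l.Sublist (PySem.List.pyRange 0 n 1) := List.filter_sublist
      have hlne : l ≠ [] := List.ne_nil_of_mem ((hmem_l 0).mpr ⟨h0r, h0S⟩)
      have hllen : l.length < n.toNat := by
        have hle : l.length ≤ n.toNat := hLlen ▸ hlsub.length_le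
        rcases Nat.lt_or_ge l.length n.toNat with h | h
        · exact h
        · have heqlen : l.length = (PySem.List.pyRange 0 n 1).length := by omega
          have := hlsub.eq_of_length heqlen
          rw [this] at hmem_l
          exact absurd (((hmem_l v).mp hv).2) hvS
      obtain ⟨u, hu, w, hwr, hwl, he⟩ := hgc l hlsub hlne hllen
      have huS : u ∈ S := ((hmem_l u).mp hu).2
      have hur : u ∈ PySem.List.pyRange 0 n 1 := ((hmem_l u).mp hu).1
      have hwS : w ∉ S := fun hws => hwl ((hmem_l w).mpr ⟨hwr, hws⟩)
      have hedge : (u, w) ∈ edgesOf rks n := (mem_edgesOf rks n (u, w)).mpr ⟨hur, hwr, he⟩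
      exact hwS (relaxStep_stable_closed hstab (u, w) hedge huS)
    · -- backward reachability is full
      intro v hv
      by_contra hvS
      have hstab := relaxStep_stable_of_bounded ((edgesOf rks n).map fun e => (e.2, e.1))
        (PySem.List.pyRange 0 n 1) h0r
        (fun e he => by
          rcases List.mem_map.mp he with ⟨p, hp, rfl⟩
          exact ((mem_edgesOf rks n p).mp hp).1)
      rw [hLlen] at hstab
      set S := (relaxStep ((edgesOf rks n).map fun e => (e.2, e.1)))^[n.toNat] ([0] : List Int) with hS
      have h0S : (0 : Int) ∈ S := mem_iterS_zero _ _
      set l := (PySem.List.pyRange 0 n 1).filter (fun x => !S.contains x) with hl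
      have hmem_l : ∀ x, x ∈ l ↔ x ∈ PySem.List.pyRange 0 n 1 ∧ x ∉ S := by
        intro x; rw [hl, List.mem_filter]; simp
      have hlsub : l.Sublist (PySem.List.pyRange 0 n 1) := List.filter_sublist
      have hlne : l ≠ [] := List.ne_nil_of_mem ((hmem_l v).mpr ⟨hv, hvS⟩)
      have h0l : (0 : Int) ∉ l := fun h0 => ((hmem_l 0).mp h0).2 h0S
      have hllen : l.length < n.toNat := by
        have hle : l.length ≤ n.toNat := hLlen ▸ hlsub.length_le
        rcases Nat.lt_or_ge l.length n.toNat with h | h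
        · exact h
        · have heqlen : l.length = (PySem.List.pyRange 0 n 1).length := by omega
          have := hlsub.eq_of_length heqlen
          rw [this] at h0l
          exact absurd h0r h0l
      obtain ⟨u, hu, w, hwr, hwl, he⟩ := hgc l hlsub hlne hllen
      have huS : u ∉ S := ((hmem_l u).mp hu).2
      have hur : u ∈ PySem.List.pyRange 0 n 1 := ((hmem_l u).mp hu).1
      have hwS : w ∈ S := by
        by_contra hws
        exact hwl ((hmem_l w).mpr ⟨hwr, hws⟩)
      have hedge : (w, u) ∈ (edgesOf rks n).map (fun e => (e.2, e.1)) :=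
        (mem_map_swap _ _ _).mpr ((mem_edgesOf rks n (u, w)).mpr ⟨hur, hwr, he⟩)
      exact huS (relaxStep_stable_closed hstab (w, u) hedge hwS)
  · rintro ⟨hf, hb⟩ c1 hsub hne hlen
    by_cases h0 : (0 : Int) ∈ c1
    · obtain ⟨v, hvr, hvc⟩ := exists_notMem_of_length_lt hlen
      have hpath := iterS_sound (edgesOf rks n) n.toNat v (hf v hvr)
      obtain ⟨x, hx, y, hy, hrel⟩ := crossing hpath h0 hvc
      have hme := (mem_edgesOf rks n (x, y)).mp hrel
      exact ⟨x, hx, y, hme.2.1, hy, hme.2.2⟩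
    · obtain ⟨u, hu⟩ := List.exists_mem_of_ne_nil c1 hne
      have hur : u ∈ PySem.List.pyRange 0 n 1 := hsub.subset hu
      have hpath' := iterS_sound ((edgesOf rks n).map fun e => (e.2, e.1)) n.toNat u (hb u hur)
      have hpath : Relation.ReflTransGen (fun a b => (a, b) ∈ edgesOf rks n) u 0 := by
        have hiff : ∀ a b : Int,
            ((a, b) ∈ (edgesOf rks n).map fun e => (e.2, e.1)) ↔ (b, a) ∈ edgesOf rks n :=
          fun a b => mem_map_swap _ a b
        have hswap : Relation.ReflTransGen
            (Function.swap fun a b => (a, b) ∈ edgesOf rks n) 0 u := by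
          refine Relation.ReflTransGen.mono ?_ hpath'
          intro a b hab
          exact (hiff a b).mp hab
        exact (Relation.reflTransGen_swap).mp hswap
      obtain ⟨x, hx, y, hy, hrel⟩ := crossing hpath hu h0
      have hme := (mem_edgesOf rks n (x, y)).mp hrel
      exact ⟨x, hx, y, hme.2.1, hy, hme.2.2⟩

-- ===== VERDICT (by name: the statement is the Claim_ definition above) =====
theorem satisfies_connectivity_condition_spec : Claim_equal_satisfies_connectivity_condition := by
  intro rks n _
  unfold Spec_satisfies_connectivity_condition
  by_cases hn : n < 2
  · simp [satisfies_connectivity_condition, satisfies_connectivity_condition_alt, hn]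
  · have hn2 : 2 ≤ n := by omega
    have h1 := satA_iff rks n hn2
    have h2 := main_iff rks n hn2
    rw [satisfies_connectivity_condition_alt]
    simp only [if_neg hn]
    have : satisfies_connectivity_condition rks n = true ↔
        (reachAll n (edgesOf rks n) && reachAll n ((edgesOf rks n).map fun e => (e.2, e.1))) = true :=
      h1.trans h2
    exact Bool.coe_iff_coe.mp this
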